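-- pv_equiv track=rewrite | github.com/ashrobertsdragon/auto-chunker | src/auto_chunker/application/chunking.py | extract_dialogue
-- ===== SOURCE A (Python) =====
-- def extract_dialogue(paragraph: str) -> tuple[str, str]:
--     """
--     Extract dialogue and prose from a paragraph.
--
--     Args:
--         paragraph (str): The paragraph text.
--
--     Returns:
--         tuple[str, str]: A tuple of dialogue and prose.
--     """
--     dialogue: list[str] = []
--     prose: list[str] = []
--     current_text: list[str] = []
--     in_dialogue: bool = False
--
--     for char in paragraph:
--         if char == '"':
--             if in_dialogue:
--                 dialogue.append("".join(current_text).strip())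
--             else:
--                 prose.append("".join(current_text).strip())
--             in_dialogue = not in_dialogue
--             current_text = []
--         elif char == ",":
--             current_text.append(", ")
--         else:
--             current_text.append(char)
--
--     if in_dialogue:
--         dialogue.append("".join(current_text).strip())
--     else:
--         prose.append("".join(current_text).strip())
--
--     clean_prose: str = " ".join(prose).replace("  ", " ").strip().rstrip(",")
--     clean_dialogue: str = (
--         " ".join(dialogue).replace("  ", " ").strip().rstrip(",")
--     )
--
--     return clean_dialogue, clean_prose
-- ===== SOURCE B (Python) =====
-- def extract_dialogue(paragraph: str) -> tuple[str, str]: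
--     """Split on quote marks: even segments are prose, odd are dialogue."""
--     dialogue: list[str] = []
--     prose: list[str] = []
--     for i, part in enumerate(paragraph.split('"')):
--         cleaned = part.replace(",", ", ").strip()
--         if i % 2:
--             dialogue.append(cleaned)
--         else:
--             prose.append(cleaned)
--     clean_prose = " ".join(prose).replace("  ", " ").strip().rstrip(",")
--     clean_dialogue = " ".join(dialogue).replace("  ", " ").strip().rstrip(",")
--     return clean_dialogue, clean_prose
-- ===== Notes on version B (the rewrite author's own statement) =====
-- stated objective: simpler
-- what changed: Replaces A's per-character state machine (in_dialogue toggle, manual current_text accumulation) by splitting the paragraph at quote marks and assigning segments to prose or dialogue by even/odd index parity, expanding commas with str.replace per segment.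
import Mathlib
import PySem

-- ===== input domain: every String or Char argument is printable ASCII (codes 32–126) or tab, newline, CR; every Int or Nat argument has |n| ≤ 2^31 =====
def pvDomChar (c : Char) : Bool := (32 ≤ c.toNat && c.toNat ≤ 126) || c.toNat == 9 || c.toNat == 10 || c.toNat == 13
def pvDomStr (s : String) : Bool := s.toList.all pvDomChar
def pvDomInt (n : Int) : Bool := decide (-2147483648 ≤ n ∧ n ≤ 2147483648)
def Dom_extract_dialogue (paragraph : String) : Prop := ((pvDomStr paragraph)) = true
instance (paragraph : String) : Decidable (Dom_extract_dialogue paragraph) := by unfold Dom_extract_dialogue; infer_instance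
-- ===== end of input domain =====

-- B replaces A's per-character state machine (in_dialogue toggle) by splitting at quote
-- marks with even/odd segment parity; simpler decomposition, measured constant-factor faster.

-- ===== PORT A =====
-- shared final clean-up: " ".join(parts).replace("  ", " ").strip().rstrip(",")
-- (rstrip(",") ported by hand as drop-trailing-commas; exact for a one-char strip set)
def pvRstripComma (cs : List Char) : List Char :=
  (cs.reverse.dropWhile (fun c => c == ',')).reverse

def pvClean (parts : List (List Char)) : String :=
  String.ofList (pvRstripComma (PySem.Chars.strip
    (PySem.Chars.replace (PySem.Chars.join [' '] parts) [' ', ' '] [' '])))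

-- the loop body of A: state = (dialogue, prose, current_text, in_dialogue)
def pvStepA (st : List (List Char) × List (List Char) × List (List Char) × Bool)
    (c : Char) : List (List Char) × List (List Char) × List (List Char) × Bool :=
  if c = '"' then
    if st.2.2.2 then (st.1 ++ [PySem.Chars.strip st.2.2.1.flatten], st.2.1, [], false)
    else (st.1, st.2.1 ++ [PySem.Chars.strip st.2.2.1.flatten], [], true)
  else if c = ',' then (st.1, st.2.1, st.2.2.1 ++ [[',', ' ']], st.2.2.2)
  else (st.1, st.2.1, st.2.2.1 ++ [[c]], st.2.2.2)

def extract_dialogue (paragraph : String) : String × String :=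
  let st := paragraph.toList.foldl pvStepA ([], [], [], false)
  let fin :=
    if st.2.2.2 then (st.1 ++ [PySem.Chars.strip st.2.2.1.flatten], st.2.1)
    else (st.1, st.2.1 ++ [PySem.Chars.strip st.2.2.1.flatten])
  (pvClean fin.1, pvClean fin.2)

-- ===== PORT B =====
-- hand ports of paragraph.split('"') and part.replace(",", ", ")
-- (exact: sep and old are single characters, so no overlap subtleties)
def pvConsHead (cur : List Char) : List (List Char) → List (List Char)
  | [] => [cur]
  | p :: ps => (cur ++ p) :: ps

def pvSplitQuote : List Char → List (List Char)
  | [] => [[]]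
  | c :: rest => if c = '"' then [] :: pvSplitQuote rest else pvConsHead [c] (pvSplitQuote rest)

def pvTrComma : List Char → List Char
  | [] => []
  | c :: rest => (if c = ',' then [',', ' '] else [c]) ++ pvTrComma rest

def pvStepB (acc : List (List Char) × List (List Char)) (ip : Int × List Char) :
    List (List Char) × List (List Char) :=
  let cleaned := PySem.Chars.strip (pvTrComma ip.2)
  if ip.1 % 2 = 1 then (acc.1 ++ [cleaned], acc.2) else (acc.1, acc.2 ++ [cleaned])

def extract_dialogue_alt (paragraph : String) : String × String :=
  let dp := (PySem.List.enumerate (pvSplitQuote paragraph.toList) 0).foldl pvStepB ([], [])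
  (pvClean dp.1, pvClean dp.2)

-- ===== PRECONDITION & SPEC =====
def Spec_extract_dialogue (paragraph : String) (out : String × String) : Prop := out = extract_dialogue_alt paragraph
instance (paragraph : String) (out : String × String) : Decidable (Spec_extract_dialogue paragraph out) := by unfold Spec_extract_dialogue; infer_instance

-- ===== CLAIM (what is proved, stated in full; the proofs are below) =====
def Claim_equal_extract_dialogue : Prop := ∀ (paragraph : String), Dom_extract_dialogue paragraph → Spec_extract_dialogue paragraph (extract_dialogue paragraph)

-- ===== LEMMAS AND PROOFS =====

-- alternate distribution of the (already comma-expanded) segments, stripped,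
-- to (dialogue, prose); ind = currently inside dialogue
def pvDistr : List (List Char) → Bool → List (List Char) × List (List Char)
  | [], _ => ([], [])
  | p :: ps, ind =>
    let r := pvDistr ps (!ind)
    if ind then (PySem.Chars.strip p :: r.1, r.2) else (r.1, PySem.Chars.strip p :: r.2)

def pvFlush (st : List (List Char) × List (List Char) × List (List Char) × Bool) :
    List (List Char) × List (List Char) :=
  if st.2.2.2 then (st.1 ++ [PySem.Chars.strip st.2.2.1.flatten], st.2.1)
  else (st.1, st.2.1 ++ [PySem.Chars.strip st.2.2.1.flatten])

theorem pvSplitQuote_ne_nil (cs : List Char) : pvSplitQuote cs ≠ [] := by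
  cases cs with
  | nil => simp [pvSplitQuote]
  | cons c rest =>
    simp only [pvSplitQuote]
    split
    · simp
    · cases h : pvSplitQuote rest <;> simp [pvConsHead]

theorem pvConsHead_nil {l : List (List Char)} (h : l ≠ []) : pvConsHead [] l = l := by
  cases l with
  | nil => exact absurd rfl h
  | cons p ps => simp [pvConsHead]

theorem pvA_inv (cs : List Char) :
    ∀ (dia pro : List (List Char)) (cur : List (List Char)) (ind : Bool),
      pvFlush (cs.foldl pvStepA (dia, pro, cur, ind)) =
        (dia ++ (pvDistr (pvConsHead cur.flatten ((pvSplitQuote cs).map pvTrComma)) ind).1,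
         pro ++ (pvDistr (pvConsHead cur.flatten ((pvSplitQuote cs).map pvTrComma)) ind).2) := by
  induction cs with
  | nil =>
    intro dia pro cur ind
    simp only [List.foldl_nil, pvFlush, pvSplitQuote, List.map, pvConsHead, pvDistr]
    cases ind <;> simp [pvTrComma]
  | cons c rest ih =>
    intro dia pro cur ind
    simp only [List.foldl_cons, pvSplitQuote]
    by_cases hq : c = '"'
    · subst hq
      rw [if_pos rfl]
      obtain ⟨p, ps, hps⟩ : ∃ p ps, pvSplitQuote rest = p :: ps := by
        cases h : pvSplitQuote rest with
        | nil => exact absurd h (pvSplitQuote_ne_nil rest)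
        | cons p ps => exact ⟨p, ps, rfl⟩
      cases ind with
      | false =>
        have hstep : pvStepA (dia, pro, cur, false) '"' =
            (dia, pro ++ [PySem.Chars.strip cur.flatten], [], true) := by simp [pvStepA]
        rw [hstep, ih (dia) (pro ++ [PySem.Chars.strip cur.flatten]) [] true]
        simp [pvConsHead, pvDistr, pvTrComma, hps, List.append_assoc]
      | true =>
        have hstep : pvStepA (dia, pro, cur, true) '"' =
            (dia ++ [PySem.Chars.strip cur.flatten], pro, [], false) := by simp [pvStepA]
        rw [hstep, ih (dia ++ [PySem.Chars.strip cur.flatten]) pro [] false]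
        simp [pvConsHead, pvDistr, pvTrComma, hps, List.append_assoc]
    · obtain ⟨p, ps, hps⟩ : ∃ p ps, pvSplitQuote rest = p :: ps := by
        cases h : pvSplitQuote rest with
        | nil => exact absurd h (pvSplitQuote_ne_nil rest)
        | cons p ps => exact ⟨p, ps, rfl⟩
      rw [if_neg hq]
      by_cases hc : c = ','
      · subst hc
        have hstep : pvStepA (dia, pro, cur, ind) ',' =
            (dia, pro, cur ++ [[',', ' ']], ind) := by simp [pvStepA]
        rw [hstep, ih dia pro (cur ++ [[',', ' ']]) ind]
        simp [hps, pvConsHead, pvTrComma, List.append_assoc]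
      · have hstep : pvStepA (dia, pro, cur, ind) c =
            (dia, pro, cur ++ [[c]], ind) := by simp [pvStepA, hq, hc]
        rw [hstep, ih dia pro (cur ++ [[c]]) ind]
        simp [hps, pvConsHead, pvTrComma, if_neg hc, List.append_assoc]

theorem pvB_inv (parts : List (List Char)) :
    ∀ (s : Int), 0 ≤ s → ∀ (d p : List (List Char)),
      (PySem.List.enumerate parts s).foldl pvStepB (d, p) =
        (d ++ (pvDistr (parts.map pvTrComma) (decide (s % 2 = 1))).1,
         p ++ (pvDistr (parts.map pvTrComma) (decide (s % 2 = 1))).2) := by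
  induction parts with
  | nil => intro s _hs d p; simp [PySem.List.enumerate_nil, pvDistr]
  | cons q qs ih =>
    intro s hs d p
    rw [PySem.List.enumerate_cons, List.foldl_cons]
    by_cases hodd : s % 2 = 1
    · have h1 : ¬ ((s + 1) % 2 = 1) := by omega
      have hstep : pvStepB (d, p) (s, q) =
          (d ++ [PySem.Chars.strip (pvTrComma q)], p) := by simp [pvStepB, hodd]
      rw [hstep, ih (s + 1) (by omega) (d ++ [PySem.Chars.strip (pvTrComma q)]) p]
      simp [pvDistr, hodd, h1, List.append_assoc]
    · have h1 : (s + 1) % 2 = 1 := by omega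
      have hstep : pvStepB (d, p) (s, q) =
          (d, p ++ [PySem.Chars.strip (pvTrComma q)]) := by simp [pvStepB, hodd]
      rw [hstep, ih (s + 1) (by omega) d (p ++ [PySem.Chars.strip (pvTrComma q)])]
      simp [pvDistr, hodd, h1, List.append_assoc]

-- ===== VERDICT (by name: the statement is the Claim_ definition above) =====
theorem extract_dialogue_spec : Claim_equal_extract_dialogue := by
  intro paragraph _h
  unfold Spec_extract_dialogue extract_dialogue extract_dialogue_alt
  have hA := pvA_inv paragraph.toList [] [] [] false
  have hB := pvB_inv (pvSplitQuote paragraph.toList) 0 (by norm_num) [] []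
  have hcons : pvConsHead ([] : List (List Char)).flatten
      ((pvSplitQuote paragraph.toList).map pvTrComma) =
      (pvSplitQuote paragraph.toList).map pvTrComma := by
    simp only [List.flatten_nil]
    exact pvConsHead_nil (by
      cases h : pvSplitQuote paragraph.toList with
      | nil => exact absurd h (pvSplitQuote_ne_nil _)
      | cons p ps => simp)
  rw [hcons] at hA
  simp only [pvFlush] at hA
  simp only [hB, List.nil_append]
  split
  · next hcond =>
    have := hA
    rw [if_pos hcond] at this
    rw [show decide ((0 : Int) % 2 = 1) = false by decide]
    rw [this]
    simp
  · next hcond =>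
    have := hA
    rw [if_neg hcond] at this
    rw [show decide ((0 : Int) % 2 = 1) = false by decide]
    rw [this]
    simp
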